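-- pv_equiv track=rewrite | github.com/Dethios/tools | scripts/settings_manager.py | assign_groups
-- ===== SOURCE A (Python) =====
-- def group_definitions():
--     return [
--         ("Workbench", "UI, layout, and workbench behavior.", ["workbench."]),
--         ("Window", "Window and workspace startup behavior.", ["window."]),
--         ("Editor", "Editor behavior, formatting, and suggestions.", ["editor.", "diffEditor."]),
--         ("Files", "File handling, auto-save, and excludes.", ["files."]),
--         ("Explorer", "File explorer behavior and nesting.", ["explorer."]),
--         ("Terminal", "Integrated terminal behavior and appearance.", ["terminal."]),
--         ("SCM and Git", "Source control and Git behavior.", ["scm.", "git."]),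
--         ("Notebook", "Notebook UI behavior.", ["notebook."]),
--         ("Markdown", "Markdown preview and extensions.", ["markdown.", "markdown-preview-enhanced.", "markdown.extension."]),
--         ("LaTeX and LTeX", "LaTeX tooling and grammar checks.", ["latex-workshop.", "ltex."]),
--         ("Spellcheck", "cSpell configuration and dictionaries.", ["cSpell."]),
--         ("Language: JavaScript", "JavaScript formatter and language settings.", ["javascript."]),
--         ("Language: TypeScript", "TypeScript formatter and language settings.", ["typescript."]),
--         ("Language: Python", "Python language settings.", ["python.", "pythonIndent."]),
--         ("Language: C/C++", "C/C++ extension settings.", ["C_Cpp."]),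
--         ("Language: Emmet", "Emmet expansion settings.", ["emmet."]),
--         ("JSON", "JSON schema and language settings.", ["json."]),
--         ("Extensions and Tools", "Extension-specific settings and utilities.", [
--             "extensions.",
--             "errorLens.",
--             "evenBetterToml.",
--             "code-runner.",
--             "todo-tree.",
--             "grunt.",
--             "gulp.",
--             "npm.",
--             "mermaid-chat.",
--             "vscode-office.",
--             "prettier.",
--         ]),
--         ("Chat and AI", "Chat, Copilot, and AI tooling.", ["chat.", "github.", "geminicodeassist."]),
--         ("Application", "Application-level experimental settings.", ["application."]),
--         ("Language Overrides", "Per-language override blocks.", []),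
--     ]
--
-- def assign_groups(keys):
--     remaining = set(keys)
--     grouped = []
--     for name, description, prefixes in group_definitions():
--         if name == "Language Overrides":
--             matched = sorted([k for k in remaining if k.startswith("[")])
--         else:
--             matched = sorted([k for k in remaining if any(k.startswith(prefix) for prefix in prefixes)])
--         if matched:
--             grouped.append((name, description, matched))
--             remaining -= set(matched)
--     if remaining:
--         grouped.append(("Other", "Settings that do not match a primary group.", sorted(remaining)))
--     return grouped
-- ===== SOURCE B (Python) =====
-- def group_definitions():
--     return [
--         ("Workbench", "UI, layout, and workbench behavior.", ["workbench."]),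
--         ("Window", "Window and workspace startup behavior.", ["window."]),
--         ("Editor", "Editor behavior, formatting, and suggestions.", ["editor.", "diffEditor."]),
--         ("Files", "File handling, auto-save, and excludes.", ["files."]),
--         ("Explorer", "File explorer behavior and nesting.", ["explorer."]),
--         ("Terminal", "Integrated terminal behavior and appearance.", ["terminal."]),
--         ("SCM and Git", "Source control and Git behavior.", ["scm.", "git."]),
--         ("Notebook", "Notebook UI behavior.", ["notebook."]),
--         ("Markdown", "Markdown preview and extensions.", ["markdown.", "markdown-preview-enhanced.", "markdown.extension."]),
--         ("LaTeX and LTeX", "LaTeX tooling and grammar checks.", ["latex-workshop.", "ltex."]),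
--         ("Spellcheck", "cSpell configuration and dictionaries.", ["cSpell."]),
--         ("Language: JavaScript", "JavaScript formatter and language settings.", ["javascript."]),
--         ("Language: TypeScript", "TypeScript formatter and language settings.", ["typescript."]),
--         ("Language: Python", "Python language settings.", ["python.", "pythonIndent."]),
--         ("Language: C/C++", "C/C++ extension settings.", ["C_Cpp."]),
--         ("Language: Emmet", "Emmet expansion settings.", ["emmet."]),
--         ("JSON", "JSON schema and language settings.", ["json."]),
--         ("Extensions and Tools", "Extension-specific settings and utilities.", [
--             "extensions.",
--             "errorLens.",
--             "evenBetterToml.",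
--             "code-runner.",
--             "todo-tree.",
--             "grunt.",
--             "gulp.",
--             "npm.",
--             "mermaid-chat.",
--             "vscode-office.",
--             "prettier.",
--         ]),
--         ("Chat and AI", "Chat, Copilot, and AI tooling.", ["chat.", "github.", "geminicodeassist."]),
--         ("Application", "Application-level experimental settings.", ["application."]),
--         ("Language Overrides", "Per-language override blocks.", []),
--     ]
--
--
-- def _first_group(key, groups):
--     for name, _, prefixes in groups:
--         if name == "Language Overrides":
--             if key.startswith("["):
--                 return name
--         elif any(key.startswith(p) for p in prefixes):
--             return name
--     return None
--
--
-- def assign_groups(keys):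
--     groups = group_definitions()
--     buckets = {name: [] for name, _, _ in groups}
--     other = []
--     for key in set(keys):
--         name = _first_group(key, groups)
--         if name is None:
--             other.append(key)
--         else:
--             buckets[name].append(key)
--     out = [(name, desc, sorted(buckets[name])) for name, desc, _ in groups if buckets[name]]
--     if other:
--         out.append(("Other", "Settings that do not match a primary group.", sorted(other)))
--     return out
-- ===== Notes on version B (the rewrite author's own statement) =====
-- stated objective: alternative
-- what changed: B replaces A's per-group rescans of a shrinking remaining-set (with a set built and subtracted on every group) by a single bucketing pass: each distinct key is assigned once to the first group whose prefix matches (or to an Other bucket), and the output is then read off the buckets in group order; same asymptotic cost, no intermediate sets.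
import Mathlib
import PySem

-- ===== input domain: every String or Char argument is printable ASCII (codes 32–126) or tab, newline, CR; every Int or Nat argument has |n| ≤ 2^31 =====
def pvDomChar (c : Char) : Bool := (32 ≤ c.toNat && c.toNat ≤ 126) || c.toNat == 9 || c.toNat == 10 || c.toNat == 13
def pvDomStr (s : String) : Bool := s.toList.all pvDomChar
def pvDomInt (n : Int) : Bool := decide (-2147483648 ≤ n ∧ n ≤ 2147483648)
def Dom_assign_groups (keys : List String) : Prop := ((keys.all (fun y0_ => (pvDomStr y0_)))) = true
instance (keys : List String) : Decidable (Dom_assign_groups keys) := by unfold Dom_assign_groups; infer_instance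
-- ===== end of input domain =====

-- B replaces A's per-group rescans of a shrinking remaining-set by one bucketing pass
-- (each distinct key goes to the first group whose prefix matches); same cost, no intermediate sets.

-- ===== PORT A =====
-- shared helper: port of group_definitions()
def groupDefs : List (String × String × List String) :=
  [("Workbench", "UI, layout, and workbench behavior.", ["workbench."]),
   ("Window", "Window and workspace startup behavior.", ["window."]),
   ("Editor", "Editor behavior, formatting, and suggestions.", ["editor.", "diffEditor."]),
   ("Files", "File handling, auto-save, and excludes.", ["files."]),
   ("Explorer", "File explorer behavior and nesting.", ["explorer."]),
   ("Terminal", "Integrated terminal behavior and appearance.", ["terminal."]),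
   ("SCM and Git", "Source control and Git behavior.", ["scm.", "git."]),
   ("Notebook", "Notebook UI behavior.", ["notebook."]),
   ("Markdown", "Markdown preview and extensions.", ["markdown.", "markdown-preview-enhanced.", "markdown.extension."]),
   ("LaTeX and LTeX", "LaTeX tooling and grammar checks.", ["latex-workshop.", "ltex."]),
   ("Spellcheck", "cSpell configuration and dictionaries.", ["cSpell."]),
   ("Language: JavaScript", "JavaScript formatter and language settings.", ["javascript."]),
   ("Language: TypeScript", "TypeScript formatter and language settings.", ["typescript."]),
   ("Language: Python", "Python language settings.", ["python.", "pythonIndent."]),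
   ("Language: C/C++", "C/C++ extension settings.", ["C_Cpp."]),
   ("Language: Emmet", "Emmet expansion settings.", ["emmet."]),
   ("JSON", "JSON schema and language settings.", ["json."]),
   ("Extensions and Tools", "Extension-specific settings and utilities.",
     ["extensions.", "errorLens.", "evenBetterToml.", "code-runner.", "todo-tree.",
      "grunt.", "gulp.", "npm.", "mermaid-chat.", "vscode-office.", "prettier."]),
   ("Chat and AI", "Chat, Copilot, and AI tooling.", ["chat.", "github.", "geminicodeassist."]),
   ("Application", "Application-level experimental settings.", ["application."]),
   ("Language Overrides", "Per-language override blocks.", [])]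

-- body of A's `for name, description, prefixes in group_definitions():` loop
def stepA (st : PySem.Set String × List (String × String × List String))
    (g : String × String × List String) :
    PySem.Set String × List (String × String × List String) :=
  let matched :=
    if g.1 = "Language Overrides" then
      PySem.List.sorted (st.1.filter (fun k => PySem.Str.startswith k "[")) (fun x => x) false
    else
      PySem.List.sorted (st.1.filter (fun k => g.2.2.any (fun p => PySem.Str.startswith k p))) (fun x => x) false
  if matched ≠ [] then
    (PySem.Set.diff st.1 (PySem.Set.ofList matched), st.2 ++ [(g.1, g.2.1, matched)])
  else st

def assign_groups (keys : List String) : List (String × String × List String) :=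
  let st := groupDefs.foldl stepA (PySem.Set.ofList keys, [])
  if st.1 ≠ [] then
    st.2 ++ [("Other", "Settings that do not match a primary group.",
              PySem.List.sorted st.1 (fun x => x) false)]
  else st.2

-- ===== PORT B =====
-- port of _first_group(key, groups)
def firstGroup : List (String × String × List String) → String → Option String
  | [], _ => none
  | g :: gs, key =>
    if g.1 = "Language Overrides" then
      if PySem.Str.startswith key "[" then some g.1 else firstGroup gs key
    else if g.2.2.any (fun p => PySem.Str.startswith key p) then some g.1
    else firstGroup gs key

-- body of B's `for key in set(keys):` loop
def stepB (st : PySem.Dict String (List String) × List String) (key : String) :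
    PySem.Dict String (List String) × List String :=
  match firstGroup groupDefs key with
  | none => (st.1, st.2 ++ [key])
  | some name => (st.1.modify name [] (fun l => l ++ [key]), st.2)

def assign_groups_alt (keys : List String) : List (String × String × List String) :=
  let buckets0 : PySem.Dict String (List String) :=
    PySem.Dict.ofList (groupDefs.map (fun g => (g.1, ([] : List String))))
  let st := (PySem.Set.ofList keys).foldl stepB (buckets0, [])
  let out := groupDefs.filterMap (fun g =>
    if st.1.getD g.1 [] ≠ [] then
      some (g.1, g.2.1, PySem.List.sorted (st.1.getD g.1 []) (fun x => x) false)
    else none)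
  if st.2 ≠ [] then
    out ++ [("Other", "Settings that do not match a primary group.",
             PySem.List.sorted st.2 (fun x => x) false)]
  else out

-- ===== PRECONDITION & SPEC =====
def Spec_assign_groups (keys : List String) (out : List (String × String × List String)) : Prop := out = assign_groups_alt keys
instance (keys : List String) (out : List (String × String × List String)) : Decidable (Spec_assign_groups keys out) := by unfold Spec_assign_groups; infer_instance

-- ===== CLAIM (what is proved, stated in full; the proofs are below) =====
def Claim_equal_assign_groups : Prop := ∀ (keys : List String), Dom_assign_groups keys → Spec_assign_groups keys (assign_groups keys)

-- ===== LEMMAS AND PROOFS =====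

-- the match test of one group, common shape of A's branch and B's _first_group step
def gtest (g : String × String × List String) (k : String) : Bool :=
  if g.1 = "Language Overrides" then PySem.Str.startswith k "["
  else g.2.2.any (fun p => PySem.Str.startswith k p)

-- the grouped list both programs produce on a suffix of the group table
def bout : List (String × String × List String) → List String → List (String × String × List String)
  | [], _ => []
  | g :: gs, rem =>
    (if PySem.List.sorted (rem.filter (fun k => gtest g k)) (fun x => x) false ≠ [] then
       [(g.1, g.2.1, PySem.List.sorted (rem.filter (fun k => gtest g k)) (fun x => x) false)]
     else []) ++ bout gs (rem.filter (fun k => !gtest g k))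

lemma matched_eq (rem : List String) (g : String × String × List String) :
    (if g.1 = "Language Overrides" then
       PySem.List.sorted (rem.filter (fun k => PySem.Str.startswith k "[")) (fun x => x) false
     else
       PySem.List.sorted (rem.filter (fun k => g.2.2.any (fun p => PySem.Str.startswith k p))) (fun x => x) false)
    = PySem.List.sorted (rem.filter (fun k => gtest g k)) (fun x => x) false := by
  by_cases h : g.1 = "Language Overrides" <;> simp [gtest, h]

lemma afold (gs : List (String × String × List String)) :
    ∀ (rem : List String) (acc : List (String × String × List String)),
      gs.foldl stepA (rem, acc)
        = (rem.filter (fun k => gs.all (fun g => !gtest g k)), acc ++ bout gs rem) := by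
  induction gs with
  | nil => intro rem acc; simp [bout]
  | cons g gs ih =>
    intro rem acc
    rw [List.foldl_cons]
    by_cases hm : rem.filter (fun k => gtest g k) = []
    · have hall : ∀ k ∈ rem, ¬ (gtest g k = true) := by
        intro k hk hgk
        have : k ∈ rem.filter (fun k => gtest g k) := List.mem_filter.mpr ⟨hk, hgk⟩
        simp [hm] at this
      have hstep : stepA (rem, acc) g = (rem, acc) := by
        simp only [stepA, matched_eq]
        simp [hm, PySem.List.sorted_eq_nil_iff]
      have hfilt : rem.filter (fun k => !gtest g k) = rem :=
        List.filter_eq_self.mpr (fun k hk => by simp [hall k hk])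
      rw [hstep, ih rem acc]
      simp only [Prod.mk.injEq]
      refine ⟨List.filter_congr (fun k hk => by simp [hall k hk]), ?_⟩
      simp [bout, hm, PySem.List.sorted_eq_nil_iff, hfilt]
    · have hstep : stepA (rem, acc) g
          = (rem.filter (fun k => !gtest g k),
             acc ++ [(g.1, g.2.1, PySem.List.sorted (rem.filter (fun k => gtest g k)) (fun x => x) false)]) := by
        simp only [stepA, matched_eq]
        rw [if_pos (by simp [PySem.List.sorted_eq_nil_iff, hm])]
        refine Prod.ext ?_ rfl
        show PySem.Set.diff rem (PySem.Set.ofList (PySem.List.sorted (rem.filter (fun k => gtest g k)) (fun x => x) false)) = _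
        simp only [PySem.Set.diff]
        refine List.filter_congr (fun k hk => ?_)
        have hmem : (k ∈ PySem.Set.ofList (PySem.List.sorted (rem.filter (fun k => gtest g k)) (fun x => x) false)) ↔ gtest g k = true := by
          simp [PySem.Set.mem_ofList, PySem.List.mem_sorted, List.mem_filter, hk]
        cases hg : gtest g k
        · simp only [Bool.not_eq_eq_eq_not, Bool.not_false]
          simp [PySem.Set.contains_eq_listContains, hmem, hg]
        · simp only [Bool.not_eq_eq_eq_not, Bool.not_true]
          simp [PySem.Set.contains_eq_listContains, hmem, hg]
      rw [hstep, ih]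
      simp only [Prod.mk.injEq]
      constructor
      · rw [List.filter_filter]
        exact List.filter_congr (fun k hk => by cases hg : gtest g k <;> simp [hg])
      · simp [bout, hm, PySem.List.sorted_eq_nil_iff]

lemma firstGroup_cons (g : String × String × List String) (gs : List (String × String × List String)) (k : String) :
    firstGroup (g :: gs) k = if gtest g k then some g.1 else firstGroup gs k := by
  by_cases h : g.1 = "Language Overrides" <;> simp [firstGroup, gtest, h]

lemma firstGroup_mem (gs : List (String × String × List String)) (k : String) (n : String)
    (h : firstGroup gs k = some n) : n ∈ gs.map (·.1) := by
  induction gs with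
  | nil => simp [firstGroup] at h
  | cons g gs ih =>
    rw [firstGroup_cons] at h
    by_cases hg : gtest g k = true
    · simp [hg] at h; simp [← h]
    · simp [hg] at h; simp [ih h]

lemma firstGroup_isNone (gs : List (String × String × List String)) (k : String) :
    (firstGroup gs k).isNone = gs.all (fun g => !gtest g k) := by
  induction gs with
  | nil => simp [firstGroup]
  | cons g gs ih =>
    rw [firstGroup_cons]
    cases hg : gtest g k <;> simp [hg, ih]

lemma bfold (rem : List String) :
    ∀ (d : PySem.Dict String (List String)) (oth : List String),
      (∀ n, ((rem.foldl stepB (d, oth)).1).getD n []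
          = d.getD n [] ++ rem.filter (fun k => firstGroup groupDefs k == some n))
      ∧ (rem.foldl stepB (d, oth)).2 = oth ++ rem.filter (fun k => (firstGroup groupDefs k).isNone) := by
  induction rem with
  | nil => intro d oth; simp
  | cons k rem ih =>
    intro d oth
    rw [List.foldl_cons]
    cases h : firstGroup groupDefs k with
    | none =>
      have hstep : stepB (d, oth) k = (d, oth ++ [k]) := by simp [stepB, h]
      rw [hstep]
      refine ⟨fun n => ?_, ?_⟩
      · rw [(ih d (oth ++ [k])).1 n]
        simp [h]
      · rw [(ih d (oth ++ [k])).2]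
        simp [h]
    | some nm =>
      have hstep : stepB (d, oth) k = (d.modify nm [] (fun l => l ++ [k]), oth) := by simp [stepB, h]
      rw [hstep]
      refine ⟨fun n => ?_, ?_⟩
      · rw [(ih _ oth).1 n, PySem.Dict.getD_modify]
        by_cases hn : n = nm
        · subst hn; simp [h]
        · simp [h, hn, Ne.symm hn]
      · rw [(ih _ oth).2]
        simp [h]

lemma getD_buckets0 (l : List (String × String × List String)) (n : String) :
    (PySem.Dict.ofList (l.map (fun g => (g.1, ([] : List String))))).getD n [] = [] := by
  have h : ∀ (ps : List (String × List String)) (d : PySem.Dict String (List String)),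
      (∀ m, d.getD m [] = []) → (∀ p ∈ ps, p.2 = []) → ∀ m, (d.update ps).getD m [] = [] := by
    intro ps
    induction ps with
    | nil => intro d hd _ m; simpa [PySem.Dict.update] using hd m
    | cons p rest ihp =>
      intro d hd hv m
      have hu : d.update (p :: rest) = (d.insert p.1 p.2).update rest := rfl
      rw [hu]
      refine ihp _ (fun m' => ?_) (fun q hq => hv q (by simp [hq])) m
      rw [PySem.Dict.getD_insert]
      split
      · exact hv p (by simp)
      · exact hd m'
  exact h (l.map (fun g => (g.1, ([] : List String)))) PySem.Dict.empty
    (fun m => by simp [pysem]) (by simp) n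

lemma bmain (gs : List (String × String × List String)) :
    ∀ (rem : List String), (gs.map (·.1)).Nodup →
      gs.filterMap (fun g =>
        if rem.filter (fun k => firstGroup gs k == some g.1) ≠ [] then
          some (g.1, g.2.1, PySem.List.sorted (rem.filter (fun k => firstGroup gs k == some g.1)) (fun x => x) false)
        else none) = bout gs rem := by
  induction gs with
  | nil => intro rem _; simp [bout]
  | cons g gs ih =>
    intro rem hnd
    have hnotin : g.1 ∉ gs.map (·.1) := (List.nodup_cons.mp hnd).1
    have hhead : rem.filter (fun k => firstGroup (g :: gs) k == some g.1)
        = rem.filter (fun k => gtest g k) := by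
      refine List.filter_congr (fun k _ => ?_)
      rw [firstGroup_cons]
      cases hg : gtest g k
      · rw [if_neg (by decide)]
        cases hf : firstGroup gs k with
        | none => simp
        | some n =>
          have : n ∈ gs.map (·.1) := firstGroup_mem gs k n hf
          have hne : n ≠ g.1 := fun he => hnotin (he ▸ this)
          simp [hne]
      · simp
    have htail : ∀ g' ∈ gs,
        rem.filter (fun k => firstGroup (g :: gs) k == some g'.1)
          = (rem.filter (fun k => !gtest g k)).filter (fun k => firstGroup gs k == some g'.1) := by
      intro g' hg'
      rw [List.filter_filter]
      refine List.filter_congr (fun k _ => ?_)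
      rw [firstGroup_cons]
      cases hg : gtest g k
      · simp
      · have : g'.1 ∈ gs.map (·.1) := List.mem_map.mpr ⟨g', hg', rfl⟩
        have hne : g.1 ≠ g'.1 := fun he => hnotin (he ▸ this)
        simp [hne]
    rw [List.filterMap_cons]
    have hrest : gs.filterMap (fun g' =>
        if rem.filter (fun k => firstGroup (g :: gs) k == some g'.1) ≠ [] then
          some (g'.1, g'.2.1, PySem.List.sorted (rem.filter (fun k => firstGroup (g :: gs) k == some g'.1)) (fun x => x) false)
        else none) = bout gs (rem.filter (fun k => !gtest g k)) := by
      rw [List.filterMap_congr (fun g' hg' => by rw [htail g' hg'])]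
      exact ih _ (List.nodup_cons.mp hnd).2
    by_cases hm : rem.filter (fun k => gtest g k) = []
    · rw [if_neg (by simp [hhead, hm])]
      rw [hrest]
      show _ = bout (g :: gs) rem
      simp [bout, hm, PySem.List.sorted_eq_nil_iff]
    · rw [if_pos (by simp [hhead, hm])]
      simp only [hhead, hrest]
      simp [bout, hm, PySem.List.sorted_eq_nil_iff]

lemma nodup_names : (groupDefs.map (·.1)).Nodup := by decide

-- ===== VERDICT (by name: the statement is the Claim_ definition above) =====
theorem assign_groups_spec : Claim_equal_assign_groups := by
  intro keys _
  unfold Spec_assign_groups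
  show assign_groups keys = assign_groups_alt keys
  set D : List String := PySem.Set.ofList keys with hD
  -- A's side
  have hA : assign_groups keys
      = (if D.filter (fun k => groupDefs.all (fun g => !gtest g k)) ≠ [] then
           bout groupDefs D ++ [("Other", "Settings that do not match a primary group.",
             PySem.List.sorted (D.filter (fun k => groupDefs.all (fun g => !gtest g k))) (fun x => x) false)]
         else bout groupDefs D) := by
    show (if (List.foldl stepA (D, []) groupDefs).1 ≠ [] then
            (List.foldl stepA (D, []) groupDefs).2
              ++ [("Other", "Settings that do not match a primary group.",
                   PySem.List.sorted (List.foldl stepA (D, []) groupDefs).1 (fun x => x) false)]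
          else (List.foldl stepA (D, []) groupDefs).2) = _
    rw [afold groupDefs D []]
    simp
  -- B's side
  have hbf := bfold D (PySem.Dict.ofList (groupDefs.map (fun g => (g.1, ([] : List String))))) []
  have hB : assign_groups_alt keys
      = (if D.filter (fun k => groupDefs.all (fun g => !gtest g k)) ≠ [] then
           bout groupDefs D ++ [("Other", "Settings that do not match a primary group.",
             PySem.List.sorted (D.filter (fun k => groupDefs.all (fun g => !gtest g k))) (fun x => x) false)]
         else bout groupDefs D) := by
    have hoth : (D.foldl stepB (PySem.Dict.ofList (groupDefs.map (fun g => (g.1, ([] : List String)))), [])).2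
        = D.filter (fun k => groupDefs.all (fun g => !gtest g k)) := by
      rw [hbf.2]
      simp only [List.nil_append]
      exact List.filter_congr (fun k _ => firstGroup_isNone groupDefs k)
    have hbuck : ∀ n, ((D.foldl stepB (PySem.Dict.ofList (groupDefs.map (fun g => (g.1, ([] : List String)))), [])).1).getD n []
        = D.filter (fun k => firstGroup groupDefs k == some n) := by
      intro n
      rw [hbf.1 n, getD_buckets0]
      simp
    have hout : groupDefs.filterMap (fun g =>
        if ((D.foldl stepB (PySem.Dict.ofList (groupDefs.map (fun g => (g.1, ([] : List String)))), [])).1).getD g.1 [] ≠ [] then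
          some (g.1, g.2.1, PySem.List.sorted (((D.foldl stepB (PySem.Dict.ofList (groupDefs.map (fun g => (g.1, ([] : List String)))), [])).1).getD g.1 []) (fun x => x) false)
        else none) = bout groupDefs D := by
      rw [List.filterMap_congr (fun g _ => by rw [hbuck g.1])]
      exact bmain groupDefs D nodup_names
    show (if (List.foldl stepB (PySem.Dict.ofList (List.map (fun g => (g.1, ([] : List String))) groupDefs), []) D).2 ≠ [] then
            List.filterMap (fun g =>
              if (List.foldl stepB (PySem.Dict.ofList (List.map (fun g => (g.1, ([] : List String))) groupDefs), []) D).1.getD g.1 [] ≠ [] then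
                some (g.1, g.2.1, PySem.List.sorted ((List.foldl stepB (PySem.Dict.ofList (List.map (fun g => (g.1, ([] : List String))) groupDefs), []) D).1.getD g.1 []) (fun x => x) false)
              else none) groupDefs
              ++ [("Other", "Settings that do not match a primary group.",
                   PySem.List.sorted (List.foldl stepB (PySem.Dict.ofList (List.map (fun g => (g.1, ([] : List String))) groupDefs), []) D).2 (fun x => x) false)]
          else
            List.filterMap (fun g =>
              if (List.foldl stepB (PySem.Dict.ofList (List.map (fun g => (g.1, ([] : List String))) groupDefs), []) D).1.getD g.1 [] ≠ [] then
                some (g.1, g.2.1, PySem.List.sorted ((List.foldl stepB (PySem.Dict.ofList (List.map (fun g => (g.1, ([] : List String))) groupDefs), []) D).1.getD g.1 []) (fun x => x) false)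
              else none) groupDefs) = _
    rw [hout, hoth]
  rw [hA, hB]
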